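-- pv_equiv track=rewrite | github.com/OrchIntel/ioa-core | tools/docops_prose_format.py | has_section_order
-- ===== SOURCE A (Python) =====
-- from typing import List
--
-- def has_section_order(text: str, order: List[str]) -> bool:
--     idx = -1
--     for marker in order:
--         pos = text.find(marker)
--         if pos == -1 or pos < idx:
--             return False
--         idx = pos
--     return True
-- ===== SOURCE B (Python) =====
-- def has_section_order(text, order):
--     positions = [text.find(m) for m in order]
--     return -1 not in positions and positions == sorted(positions)
-- ===== Notes on version B (the rewrite author's own statement) =====
-- stated objective: simpler
-- what changed: Replaces the early-exit loop threading a running index with a materialized table of first-occurrence positions checked globally: no -1 present and the table equals its sorted copy.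
import Mathlib
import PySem

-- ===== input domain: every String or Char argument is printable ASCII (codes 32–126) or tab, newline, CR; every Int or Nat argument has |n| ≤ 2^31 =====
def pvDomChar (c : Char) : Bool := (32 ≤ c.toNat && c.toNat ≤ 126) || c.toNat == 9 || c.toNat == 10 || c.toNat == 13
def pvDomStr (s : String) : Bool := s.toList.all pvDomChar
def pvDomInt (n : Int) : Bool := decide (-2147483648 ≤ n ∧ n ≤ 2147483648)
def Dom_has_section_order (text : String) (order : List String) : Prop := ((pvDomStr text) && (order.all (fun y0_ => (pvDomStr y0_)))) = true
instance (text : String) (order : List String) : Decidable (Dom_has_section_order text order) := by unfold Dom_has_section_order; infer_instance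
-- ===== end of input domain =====

-- B replaces A's early-exit loop with a materialized first-occurrence table checked globally (simpler decomposition, same cost).


-- ===== PORT A =====
-- the for-loop with early return, threading idx
def hsoLoop (text : String) (idx : Int) : List String → Bool
  | [] => true
  | marker :: rest =>
      let pos := PySem.Str.find text marker
      if pos = -1 ∨ pos < idx then false else hsoLoop text pos rest

def has_section_order (text : String) (order : List String) : Bool :=
  hsoLoop text (-1) order

-- ===== PORT B =====
def has_section_order_alt (text : String) (order : List String) : Bool :=
  let positions := order.map (fun m => PySem.Str.find text m)
  decide (¬ (-1 : Int) ∈ positions) && decide (positions = PySem.List.sorted positions (fun x => x) false)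

-- ===== PRECONDITION & SPEC =====
def Spec_has_section_order (text : String) (order : List String) (out : Bool) : Prop := out = has_section_order_alt text order
instance (text : String) (order : List String) (out : Bool) : Decidable (Spec_has_section_order text order out) := by unfold Spec_has_section_order; infer_instance

-- ===== CLAIM (what is proved, stated in full; the proofs are below) =====
def Claim_equal_has_section_order : Prop := ∀ (text : String) (order : List String), Dom_has_section_order text order → Spec_has_section_order text order (has_section_order text order)

-- ===== LEMMAS AND PROOFS =====

-- A's loop from idx succeeds iff no marker is missing and idx-then-positions is pairwise non-decreasing
theorem hsoLoop_iff (text : String) (idx : Int) (ms : List String) :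
    hsoLoop text idx ms = true ↔
      ((∀ m ∈ ms, PySem.Str.find text m ≠ -1) ∧
       (idx :: ms.map (fun m => PySem.Str.find text m)).Pairwise (· ≤ ·)) := by
  induction ms generalizing idx with
  | nil => simp [hsoLoop]
  | cons m rest ih =>
      simp only [hsoLoop, List.map_cons, List.mem_cons]
      by_cases h : PySem.Str.find text m = -1 ∨ PySem.Str.find text m < idx
      · simp only [if_pos h]
        constructor
        · intro hfalse; cases hfalse
        · rintro ⟨hne, hpw⟩
          rcases h with h | h
          · exact absurd h (hne m (Or.inl rfl))
          · have := (List.pairwise_cons.mp hpw).1 _ (List.mem_cons_self ..)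
            omega
      · simp only [if_neg h, ih]
        rw [not_or, Int.not_lt] at h
        constructor
        · rintro ⟨hne, hpw⟩
          refine ⟨fun x hx => hx.elim (fun e => e ▸ h.1) (hne x), ?_⟩
          rw [List.pairwise_cons]
          refine ⟨?_, hpw⟩
          intro p hp
          rcases List.mem_cons.mp hp with rfl | hp
          · exact h.2
          · have := (List.pairwise_cons.mp hpw).1 p hp
            omega
        · rintro ⟨hne, hpw⟩
          have hpw' := (List.pairwise_cons.mp hpw).2
          exact ⟨fun x hx => hne x (Or.inr hx), hpw'⟩

-- self-sortedness of the position table is exactly pairwise non-decreasing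
theorem sorted_self_iff_pairwise (ps : List Int) :
    ps = PySem.List.sorted ps (fun x => x) false ↔ ps.Pairwise (· ≤ ·) := by
  constructor
  · intro h
    have := PySem.List.sorted_pairwise ps (fun x => x)
    rwa [← h] at this
  · intro h
    exact (PySem.List.sorted_eq_self_of_pairwise ps (fun x => x) h).symm

-- ===== VERDICT (by name: the statement is the Claim_ definition above) =====
theorem has_section_order_spec : Claim_equal_has_section_order := by
  intro text order _
  unfold Spec_has_section_order has_section_order has_section_order_alt
  have hge : ∀ m : String, (-1 : Int) ≤ PySem.Str.find text m := fun m => by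
    simpa using PySem.Chars.neg_one_le_find text.toList m.toList
  rw [Bool.eq_iff_iff, hsoLoop_iff]
  simp only [Bool.and_eq_true, decide_eq_true_eq, sorted_self_iff_pairwise, List.mem_map,
    List.pairwise_cons, not_exists, not_and]
  constructor
  · rintro ⟨hne, _, hpw⟩
    exact ⟨fun m hm he => hne m hm he, hpw⟩
  · rintro ⟨hmem, hpw⟩
    refine ⟨fun m hm he => hmem m hm he, ?_, hpw⟩
    rintro p hp
    rcases hp with ⟨m, _, rfl⟩
    exact hge m
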